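-- pv_equiv track=rewrite | github.com/khangn7/cspc217 | assignments/CPSC217S23A4Starter.py | part6
-- ===== SOURCE A (Python) =====
-- def part6(my_dict:dict) -> list:
--     """
--     Return tastiest people, people who have been contacted by most people
--     :param my_dict: dict, key sick_person : values (list) people who came in contact with key
--     :return: list of strs, names of tastiest people
--     """
--     exposure_count = {}
--     for key in my_dict:
--         for contacted in my_dict[key]:
--             if contacted in exposure_count:
--                 exposure_count[contacted] += 1
--             else:
--                 exposure_count[contacted] = 1
--
--     highest = max(exposure_count.values())
--     tasty_people = []
--     for name in exposure_count:
--         if exposure_count[name] == highest: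
--             tasty_people.append(name)
--
--     return sorted(tasty_people)
-- ===== SOURCE B (Python) =====
-- def part6(my_dict: dict) -> list:
--     """
--     Return tastiest people, people who have been contacted by most people.
--     Sort all contacts, then scan the runs of equal names: the run length is
--     the exposure count, so track the longest run(s) in one pass. No counter
--     dict at all; the winners come out already in sorted order.
--     """
--     contacts = sorted(c for people in my_dict.values() for c in people)
--     best_len = 0
--     best = []
--     i = 0
--     n = len(contacts)
--     while i < n:
--         j = i + 1
--         while j < n and contacts[j] == contacts[i]:
--             j += 1
--         run = j - i
--         if run > best_len:
--             best_len = run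
--             best = [contacts[i]]
--         elif run == best_len:
--             best.append(contacts[i])
--         i = j
--     return best
-- ===== Notes on version B (the rewrite author's own statement) =====
-- stated objective: alternative
-- what changed: Replaces A's hash-counter (dict of exposure counts, then max-over-values and a filter pass) with a sort-then-scan algorithm: flatten and sort all contacts, then a single run-length scan over the sorted list keeps the names whose run is longest, yielding the answer already in sorted order with no counting dict at all.
import Mathlib
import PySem

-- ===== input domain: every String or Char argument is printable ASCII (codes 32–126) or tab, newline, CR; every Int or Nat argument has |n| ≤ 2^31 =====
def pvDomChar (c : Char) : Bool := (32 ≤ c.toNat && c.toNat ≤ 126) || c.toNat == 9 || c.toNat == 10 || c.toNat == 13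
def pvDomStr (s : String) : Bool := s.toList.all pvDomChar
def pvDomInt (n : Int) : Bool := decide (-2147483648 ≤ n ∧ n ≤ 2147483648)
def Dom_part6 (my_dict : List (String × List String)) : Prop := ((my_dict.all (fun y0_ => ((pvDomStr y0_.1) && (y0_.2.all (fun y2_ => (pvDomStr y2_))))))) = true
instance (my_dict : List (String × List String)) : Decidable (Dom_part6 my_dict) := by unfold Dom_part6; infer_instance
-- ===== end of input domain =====

-- B replaces A's hash-counter + max-over-values + filter passes with sort-then-run-length-scan
-- (no counting dict; the longest runs of the sorted contact list are the answer) — alternative algorithm.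


-- ===== PORT A =====
def part6 (my_dict : List (String × List String)) : List String :=
  let d0 := PySem.Dict.ofList my_dict
  let exposure_count :=
    d0.items.foldl (fun ec kv =>
      kv.2.foldl (fun ec contacted =>
        if ec.contains contacted then ec.insert contacted (ec.getD contacted 0 + 1)
        else ec.insert contacted 1) ec) (PySem.Dict.empty : PySem.Dict String Int)
  match PySem.List.max? exposure_count.values (fun v => v) with
  | none => []  -- Python raises ValueError here; excluded by Pre_part6
  | some highest =>
      let tasty_people :=
        exposure_count.keys.foldl (fun acc name =>
          if exposure_count.getD name 0 == highest then acc ++ [name] else acc) []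
      PySem.List.sorted tasty_people (fun x => x) false

-- ===== PORT B =====
-- the outer while-loop of Source B: each step consumes one run of equal names
-- (the inner `while j < n and contacts[j] == contacts[i]` is the run length),
-- carrying the same state (best_len, best).
def runScan : List String → Int → List String → List String
  | [], _, best => best
  | x :: xs, bestLen, best =>
      let run : Int := 1 + ((xs.takeWhile (fun y => y == x)).length : Int)
      let rest := xs.dropWhile (fun y => y == x)
      if run > bestLen then runScan rest run [x]
      else if run == bestLen then runScan rest bestLen (best ++ [x])
      else runScan rest bestLen best
termination_by s _ _ => s.length
decreasing_by
  all_goals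
    have h := List.length_dropWhile_le (p := fun y => y == x) (l := xs)
    simp only [List.length_cons]
    omega

def part6_alt (my_dict : List (String × List String)) : List String :=
  let contacts := PySem.List.sorted
    ((PySem.Dict.ofList my_dict).values.flatMap (fun people => people)) (fun x => x) false
  runScan contacts 0 []

-- ===== PRECONDITION & SPEC =====
-- Pre_ excludes exactly the inputs whose dict view contains no contact at all: there
-- Python's max() over an empty sequence raises ValueError in A.
def Pre_part6 (my_dict : List (String × List String)) : Prop :=
  (PySem.Dict.ofList my_dict).values.flatten ≠ []
instance (my_dict : List (String × List String)) : Decidable (Pre_part6 my_dict) := by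
  unfold Pre_part6; infer_instance
def pvWitness_part6 : (List (String × List String)) := [("alice", ["bob", "carol"]), ("bob", ["carol"])]
def Spec_part6 (my_dict : List (String × List String)) (out : List String) : Prop := out = part6_alt my_dict
instance (my_dict : List (String × List String)) (out : List String) : Decidable (Spec_part6 my_dict out) := by unfold Spec_part6; infer_instance

-- ===== CLAIM (what is proved, stated in full; the proofs are below) =====
def Claim_equal_part6 : Prop := ∀ (my_dict : List (String × List String)), Dom_part6 my_dict → Pre_part6 my_dict → Spec_part6 my_dict (part6 my_dict)

-- ===== LEMMAS AND PROOFS =====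

-- run-structure view of a list: the maximal run length, and the heads of the runs of length c
def runsMax : List String → Int
  | [] => 0
  | x :: xs => max (1 + ((xs.takeWhile (fun y => y == x)).length : Int))
                   (runsMax (xs.dropWhile (fun y => y == x)))
termination_by s => s.length
decreasing_by
  have h := List.length_dropWhile_le (p := fun y => y == x) (l := xs)
  simp only [List.length_cons]
  omega

def runsHeads : List String → Int → List String
  | [], _ => []
  | x :: xs, c =>
      (if (1 + ((xs.takeWhile (fun y => y == x)).length : Int)) == c then [x] else []) ++
      runsHeads (xs.dropWhile (fun y => y == x)) c
termination_by s _ => s.length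
decreasing_by
  have h := List.length_dropWhile_le (p := fun y => y == x) (l := xs)
  simp only [List.length_cons]
  omega

theorem runsMax_nonneg (s : List String) : 0 ≤ runsMax s := by
  match s with
  | [] => simp [runsMax]
  | x :: xs =>
      have := runsMax_nonneg (xs.dropWhile (fun y => y == x))
      rw [runsMax]
      omega
termination_by s.length
decreasing_by
  have h := List.length_dropWhile_le (p := fun y => y == x) (l := xs)
  simp only [List.length_cons]
  omega

-- the scan loop, characterised by the run structure
theorem runScan_eq (s : List String) (b : Int) (acc : List String) (hb : 0 ≤ b) :
    runScan s b acc =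
      if runsMax s ≤ b then acc ++ runsHeads s b else runsHeads s (runsMax s) := by
  match s with
  | [] => rw [runScan, runsMax, if_pos hb]; simp [runsHeads]
  | x :: xs =>
      set run : Int := 1 + ((xs.takeWhile (fun y => y == x)).length : Int) with hrun
      set rest := xs.dropWhile (fun y => y == x) with hrest
      have hM : runsMax (x :: xs) = max run (runsMax rest) := by rw [runsMax]
      have hH : ∀ c, runsHeads (x :: xs) c =
          (if run = c then [x] else []) ++ runsHeads rest c := fun c => by
        rw [runsHeads]; simp only [beq_iff_eq]; rfl
      have hrun1 : 1 ≤ run := by rw [hrun]; omega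
      have hMr : 0 ≤ runsMax rest := runsMax_nonneg rest
      rw [runScan]
      simp only [hM, hH, gt_iff_lt, beq_iff_eq]
      by_cases h1 : b < run
      · rw [if_pos h1, runScan_eq rest run [x] (by omega)]
        by_cases h2 : runsMax rest ≤ run
        · rw [if_pos h2, if_neg (by omega), max_eq_left h2, if_pos rfl]
        · rw [if_neg h2, if_neg (by omega), max_eq_right (by omega),
            if_neg (by omega), List.nil_append]
      · rw [if_neg h1]
        by_cases h2 : run = b
        · rw [if_pos h2, runScan_eq rest b (acc ++ [x]) hb]
          by_cases h3 : runsMax rest ≤ b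
          · rw [if_pos h3, if_pos (by omega), if_pos h2]
            simp only [List.append_assoc, List.singleton_append]
          · rw [if_neg h3, if_neg (by omega), max_eq_right (by omega),
              if_neg (by omega), List.nil_append]
        · rw [if_neg h2, runScan_eq rest b acc hb]
          by_cases h3 : runsMax rest ≤ b
          · rw [if_pos h3, if_pos (by omega), if_neg h2, List.nil_append]
          · rw [if_neg h3, if_neg (by omega), max_eq_right (by omega),
              if_neg (by omega), List.nil_append]
termination_by s.length
decreasing_by
  all_goals
    have h := List.length_dropWhile_le (p := fun y => y == x) (l := xs)
    simp only [List.length_cons, hrest]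
    omega

-- elements after the leading run of a sorted list are strictly greater than its head
theorem lt_of_mem_dropWhile (x : String) (xs : List String)
    (hs : (x :: xs).Pairwise (· ≤ ·)) :
    ∀ z ∈ xs.dropWhile (fun y => y == x), x < z := by
  intro z hz
  obtain ⟨hx, hxs⟩ := List.pairwise_cons.mp hs
  cases e : xs.dropWhile (fun y => y == x) with
  | nil => rw [e] at hz; simp at hz
  | cons a tl =>
      have w : xs.dropWhile (fun y => y == x) ≠ [] := by simp [e]
      have ha : ((a : String) == x) = false := by
        have := List.head_dropWhile_not (fun y => y == x) w
        simp only [e, List.head_cons] at this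
        simpa using this
      have hamem : a ∈ xs := (List.dropWhile_sublist _).subset (by rw [e]; simp)
      have hxa : x < a := lt_of_le_of_ne (hx a hamem) (by intro hh; subst hh; simp at ha)
      have hpd : (xs.dropWhile (fun y => y == x)).Pairwise (· ≤ ·) :=
        List.Pairwise.sublist (List.dropWhile_sublist _) hxs
      rw [e] at hz hpd
      rcases List.mem_cons.mp hz with rfl | hz'
      · exact hxa
      · exact lt_of_lt_of_le hxa ((List.pairwise_cons.mp hpd).1 z hz')

theorem count_head_sorted (x : String) (xs : List String) :
    (x :: xs).count x = 1 + (xs.takeWhile (fun y => y == x)).length +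
      (xs.dropWhile (fun y => y == x)).count x := by
  have hsplit : xs = xs.takeWhile (fun y => y == x) ++ xs.dropWhile (fun y => y == x) :=
    (List.takeWhile_append_dropWhile ..).symm
  have ht : (xs.takeWhile (fun y => y == x)).count x = (xs.takeWhile (fun y => y == x)).length :=
    List.count_eq_length.mpr (fun y hy => by
      have h := List.mem_takeWhile_imp (p := fun y => y == x) (l := xs) hy
      exact (beq_iff_eq.mp h).symm)
  calc (x :: xs).count x = 1 + xs.count x := by simp [List.count_cons]; omega
    _ = 1 + ((xs.takeWhile (fun y => y == x)).count x + (xs.dropWhile (fun y => y == x)).count x) := by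
          conv_lhs => rw [hsplit]
          rw [List.count_append]
    _ = _ := by omega

theorem count_tail_sorted (x z : String) (xs : List String) (hzx : z ≠ x) :
    (x :: xs).count z = (xs.dropWhile (fun y => y == x)).count z := by
  have hsplit : xs = xs.takeWhile (fun y => y == x) ++ xs.dropWhile (fun y => y == x) :=
    (List.takeWhile_append_dropWhile ..).symm
  have ht : (xs.takeWhile (fun y => y == x)).count z = 0 :=
    List.count_eq_zero.mpr (fun hz => by
      have := List.mem_takeWhile_imp hz
      exact hzx (by simpa using this))
  have h1 : (x :: xs).count z = xs.count z := by
    have hf : (x == z) = false := by simpa using Ne.symm hzx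
    rw [List.count_cons, hf]
    simp
  rw [h1]
  conv_lhs => rw [hsplit]
  rw [List.count_append, ht]
  omega

-- dedup commutes with removing one value
theorem ofList_filter_ne (l : List String) (x : String) :
    (PySem.Set.ofList l).discard x = PySem.Set.ofList (l.filter (fun y => !(y == x))) := by
  induction l with
  | nil => simp [PySem.Set.ofList_nil, PySem.Set.discard]
  | cons y l ih =>
      rw [PySem.Set.ofList_cons]
      by_cases h : y = x
      · subst h
        simp only [PySem.Set.discard] at ih ⊢
        simp [List.filter_filter, ih]
      · simp only [PySem.Set.discard] at ih ⊢
        have hq : (!(y == x)) = true := by simpa using h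
        simp only [List.filter_cons, hq, if_true]
        rw [PySem.Set.ofList_cons]
        simp only [PySem.Set.discard]
        rw [← ih, List.filter_filter, List.filter_filter]
        rw [show (fun (a : String) => (!(a == y)) && (!(a == x))) =
            (fun (a : String) => (!(a == x)) && (!(a == y))) from
          funext fun a => Bool.and_comm _ _]

-- the distinct elements of a sorted list are its head and the distinct elements after its first run
theorem ofList_sorted_cons (x : String) (xs : List String)
    (hs : (x :: xs).Pairwise (· ≤ ·)) :
    PySem.Set.ofList (x :: xs) = x :: PySem.Set.ofList (xs.dropWhile (fun y => y == x)) := by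
  rw [PySem.Set.ofList_cons, ofList_filter_ne]
  congr 1
  have hsplit : xs = xs.takeWhile (fun y => y == x) ++ xs.dropWhile (fun y => y == x) :=
    (List.takeWhile_append_dropWhile ..).symm
  conv_lhs => rw [hsplit]
  rw [List.filter_append]
  have h1 : (xs.takeWhile (fun y => y == x)).filter (fun y => !(y == x)) = [] := by
    rw [List.filter_eq_nil_iff]
    intro a ha
    have := List.mem_takeWhile_imp ha
    simp [this]
  have h2 : (xs.dropWhile (fun y => y == x)).filter (fun y => !(y == x)) =
      xs.dropWhile (fun y => y == x) := by
    rw [List.filter_eq_self]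
    intro a ha
    have := lt_of_mem_dropWhile x xs hs a ha
    simp [ne_of_gt this]
  rw [h1, h2, List.nil_append]

-- dedup is a sublist (so it inherits sortedness)
theorem ofList_sublist (l : List String) : (PySem.Set.ofList l).Sublist l := by
  induction l with
  | nil => simp [PySem.Set.ofList_nil]
  | cons y l ih =>
      rw [PySem.Set.ofList_cons]
      exact List.Sublist.cons₂ y (List.Sublist.trans (by simpa [PySem.Set.discard] using List.filter_sublist _) ih)

theorem runsHeads_sorted (s : List String) (hs : s.Pairwise (· ≤ ·)) (c : Int) :
    runsHeads s c = (PySem.Set.ofList s).filter (fun z => ((s.count z : Int) == c)) := by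
  match s with
  | [] => simp [runsHeads, PySem.Set.ofList_nil]
  | x :: xs =>
      set rest := xs.dropWhile (fun y => y == x) with hrest
      have hsr : rest.Pairwise (· ≤ ·) :=
        List.Pairwise.sublist (List.dropWhile_sublist _) (List.pairwise_cons.mp hs).2
      rw [runsHeads, runsHeads_sorted rest hsr c, ofList_sorted_cons x xs hs]
      rw [List.filter_cons]
      have hcx : (((x :: xs).count x : Int) == c) =
          ((1 + ((xs.takeWhile (fun y => y == x)).length : Int)) == c) := by
        rw [count_head_sorted x xs]
        have h0 : rest.count x = 0 := List.count_eq_zero.mpr (fun hmem =>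
          lt_irrefl x (lt_of_mem_dropWhile x xs hs x hmem))
        rw [← hrest, h0]
        push_cast
        ring_nf
      rw [hcx]
      by_cases hb : ((1 + ((xs.takeWhile (fun y => y == x)).length : Int)) == c) = true
      · rw [hb]
        simp only [if_true, List.singleton_append]
        congr 1
        apply List.filter_congr
        intro z hz
        have hzmem : z ∈ rest := (ofList_sublist rest).subset hz
        rw [count_tail_sorted x z xs (ne_of_gt (lt_of_mem_dropWhile x xs hs z hzmem))]
      · simp only [Bool.not_eq_true] at hb
        simp only [hb, Bool.false_eq_true, if_false, List.nil_append]
        apply List.filter_congr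
        intro z hz
        have hzmem : z ∈ rest := (ofList_sublist rest).subset hz
        rw [count_tail_sorted x z xs (ne_of_gt (lt_of_mem_dropWhile x xs hs z hzmem))]
termination_by s.length
decreasing_by
  have h := List.length_dropWhile_le (p := fun y => y == x) (l := xs)
  simp only [List.length_cons, hrest]
  omega

theorem count_le_runsMax (s : List String) (hs : s.Pairwise (· ≤ ·)) :
    ∀ z ∈ s, ((s.count z : Nat) : Int) ≤ runsMax s := by
  match s with
  | [] => intro z hz; simp at hz
  | x :: xs =>
      intro z hz
      set rest := xs.dropWhile (fun y => y == x) with hrest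
      have hsr : rest.Pairwise (· ≤ ·) :=
        List.Pairwise.sublist (List.dropWhile_sublist _) (List.pairwise_cons.mp hs).2
      have hM : runsMax (x :: xs) = max (1 + ((xs.takeWhile (fun y => y == x)).length : Int))
          (runsMax rest) := by rw [runsMax]
      by_cases hzx : z = x
      · subst hzx
        have h0 : rest.count z = 0 := List.count_eq_zero.mpr (fun hmem =>
          lt_irrefl z (lt_of_mem_dropWhile z xs hs z hmem))
        have := count_head_sorted z xs
        rw [← hrest, h0] at this
        rw [hM, this]
        push_cast
        omega
      · have hcz : (x :: xs).count z = rest.count z := count_tail_sorted x z xs hzx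
        have hzxs : z ∈ xs := by rcases List.mem_cons.mp hz with h | h; exact absurd h hzx; exact h
        have hzrest : z ∈ rest := by
          have hsplit : xs = xs.takeWhile (fun y => y == x) ++ rest :=
            (List.takeWhile_append_dropWhile ..).symm
          rw [hsplit] at hzxs
          rcases List.mem_append.mp hzxs with h | h
          · exact absurd (by simpa using List.mem_takeWhile_imp h) hzx
          · exact h
        have := count_le_runsMax rest hsr z hzrest
        rw [hM, hcz]
        omega
termination_by s.length
decreasing_by
  have h := List.length_dropWhile_le (p := fun y => y == x) (l := xs)
  simp only [List.length_cons, hrest]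
  omega

theorem runsMax_attained (s : List String) (hs : s.Pairwise (· ≤ ·)) (hne : s ≠ []) :
    ∃ z ∈ s, ((s.count z : Nat) : Int) = runsMax s := by
  match s with
  | [] => exact absurd rfl hne
  | x :: xs =>
      set rest := xs.dropWhile (fun y => y == x) with hrest
      have hsr : rest.Pairwise (· ≤ ·) :=
        List.Pairwise.sublist (List.dropWhile_sublist _) (List.pairwise_cons.mp hs).2
      have hM : runsMax (x :: xs) = max (1 + ((xs.takeWhile (fun y => y == x)).length : Int))
          (runsMax rest) := by rw [runsMax]
      by_cases h2 : runsMax rest ≤ 1 + ((xs.takeWhile (fun y => y == x)).length : Int)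
      · refine ⟨x, by simp, ?_⟩
        have h0 : rest.count x = 0 := List.count_eq_zero.mpr (fun hmem =>
          lt_irrefl x (lt_of_mem_dropWhile x xs hs x hmem))
        have hc := count_head_sorted x xs
        rw [← hrest, h0] at hc
        rw [hM, max_eq_left h2, hc]
        push_cast
        ring
      · have hrne : rest ≠ [] := by
          intro h
          rw [h] at h2
          exact h2 (by simp [runsMax]; omega)
        obtain ⟨z, hzmem, hzc⟩ := runsMax_attained rest hsr hrne
        have hzx : z ≠ x := ne_of_gt (lt_of_mem_dropWhile x xs hs z hzmem)
        refine ⟨z, ?_, ?_⟩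
        · exact List.mem_cons_of_mem x ((List.dropWhile_sublist _).subset hzmem)
        · rw [count_tail_sorted x z xs hzx, ← hrest, hzc, hM, max_eq_right (by omega)]
termination_by s.length
decreasing_by
  have h := List.length_dropWhile_le (p := fun y => y == x) (l := xs)
  simp only [List.length_cons, hrest]
  omega

-- A's counting-loop body equals the unconditional insert-of-getD+1 body
theorem countBody_eq :
    (fun (ec : PySem.Dict String Int) contacted =>
      if ec.contains contacted then ec.insert contacted (ec.getD contacted 0 + 1)
      else ec.insert contacted 1)
    = fun ec name => ec.insert name (ec.getD name 0 + 1) := by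
  funext ec c
  by_cases h : ec.contains c
  · simp [h]
  · have h' : ec.contains c = false := by simpa using h
    rw [PySem.Dict.getD_of_not_contains _ _ h']
    simp [h']

theorem main_eq (my_dict : List (String × List String))
    (hpre : (PySem.Dict.ofList my_dict).values.flatten ≠ []) :
    part6 my_dict = part6_alt my_dict := by
  unfold part6 part6_alt
  simp only []
  set d0 := PySem.Dict.ofList my_dict with hd0
  set cs := d0.items.flatMap (fun kv => kv.2) with hcs_def
  have hvals : d0.values.flatMap (fun people => people) = cs := by
    simp [PySem.Dict.values, hcs_def, List.flatMap_map]
  have hcs : cs ≠ [] := by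
    intro h
    apply hpre
    have : d0.values.flatten = cs := by
      simp [PySem.Dict.values, hcs_def, List.flatMap_def]
    rw [this, h]
  -- A's counting loop builds counter cs
  have hA : d0.items.foldl (fun ec kv =>
      kv.2.foldl (fun ec contacted =>
        if ec.contains contacted then ec.insert contacted (ec.getD contacted 0 + 1)
        else ec.insert contacted 1) ec) (PySem.Dict.empty : PySem.Dict String Int) = PySem.Dict.counter cs := by
    rw [countBody_eq, ← List.foldl_flatMap]
    exact PySem.Dict.foldl_insert_getD_add_one_eq_counter cs
  rw [hvals, hA]
  set C := PySem.Dict.counter cs with hC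
  set cs' := PySem.List.sorted cs (fun x => x) false with hcs'
  have hperm : cs'.Perm cs := PySem.List.sorted_perm cs (fun x => x) false
  have hsorted : cs'.Pairwise (· ≤ ·) := PySem.List.sorted_pairwise cs (fun x => x)
  have hcs'ne : cs' ≠ [] := fun h => hcs (h ▸ hperm).symm.eq_nil
  set M := runsMax cs' with hMdef
  obtain ⟨z0, hz0mem, hz0c⟩ := runsMax_attained cs' hsorted hcs'ne
  have hM1 : 1 ≤ M := by
    have : 1 ≤ cs'.count z0 := List.one_le_count_iff.mpr hz0mem
    omega
  -- highest = M
  have hvalues : C.values = (PySem.Set.ofList cs).map (fun k => ((cs.count k : Nat) : Int)) := by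
    have := PySem.Dict.items_counter cs
    simp [PySem.Dict.values, hC, this, List.map_map, Function.comp_def]
  have hcount_eq : ∀ z, cs'.count z = cs.count z := fun z => hperm.count_eq z
  have hmax : PySem.List.max? C.values (fun v => v) = some M := by
    cases e : PySem.List.max? C.values (fun v => v) with
    | none =>
        have h0 := (PySem.List.max?_eq_none_iff _ _).mp e
        rw [hvalues] at h0
        simp only [List.map_eq_nil_iff] at h0
        exact absurd (List.eq_nil_iff_forall_not_mem.mpr (fun a ha =>
          (List.eq_nil_iff_forall_not_mem.mp h0 a ((PySem.Set.mem_ofList _ _).mpr ha)))) hcs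
    | some m =>
        have hmmem := PySem.List.max?_mem e
        rw [hvalues] at hmmem
        obtain ⟨k, hkmem, hkeq⟩ := List.mem_map.mp hmmem
        have hkcs' : k ∈ cs' := hperm.mem_iff.mpr ((PySem.Set.mem_ofList _ _).mp hkmem)
        have h1 : m ≤ M := by
          rw [← hkeq, ← hcount_eq k]
          exact count_le_runsMax cs' hsorted k hkcs'
        have h2 : M ≤ m := by
          have hz0cs : z0 ∈ cs := hperm.mem_iff.mp hz0mem
          have hin : ((cs.count z0 : Nat) : Int) ∈ C.values := by
            rw [hvalues]
            exact List.mem_map.mpr ⟨z0, (PySem.Set.mem_ofList _ _).mpr hz0cs, rfl⟩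
          have := PySem.List.max?_isMax e _ hin
          rw [hcount_eq z0] at hz0c
          omega
        exact congrArg some (le_antisymm h1 h2)
  rw [hmax]
  simp only []
  -- A side: the append loop is a filter over the counter's keys
  rw [PySem.List.foldl_append_if_eq_filter, List.nil_append]
  have hAfilter : C.keys.filter (fun name => C.getD name 0 == M) =
      (PySem.Set.ofList cs).filter (fun z => ((cs.count z : Nat) : Int) == M) := by
    rw [hC, PySem.Dict.keys_counter]
    apply List.filter_congr
    intro z _
    rw [PySem.Dict.getD_counter]
  rw [hAfilter]
  -- B side: the scan returns the heads of the longest runs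
  rw [runScan_eq cs' 0 [] le_rfl, if_neg (by omega), runsHeads_sorted cs' hsorted M]
  -- both filters pick the same names; B's is already sorted
  have hpred : (fun z => ((cs'.count z : Nat) : Int) == M) =
      (fun z => ((cs.count z : Nat) : Int) == M) := funext fun z => by rw [hcount_eq z]
  rw [hpred]
  apply PySem.List.sorted_eq_of_perm_of_pairwise_lt
  · apply List.Perm.filter
    exact (List.perm_ext_iff_of_nodup (PySem.Set.nodup_ofList _) (PySem.Set.nodup_ofList _)).mpr
      (fun a => by
        rw [PySem.Set.mem_ofList, PySem.Set.mem_ofList]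
        exact hperm.mem_iff)
  · have hple : (PySem.Set.ofList cs').Pairwise (· ≤ ·) :=
      List.Pairwise.sublist (ofList_sublist cs') hsorted
    have hnd : (PySem.Set.ofList cs').Nodup := PySem.Set.nodup_ofList _
    have hplt : (PySem.Set.ofList cs').Pairwise (· < ·) :=
      List.Pairwise.imp₂ (fun a b hle hne => lt_of_le_of_ne hle hne) hple hnd
    exact List.Pairwise.sublist List.filter_sublist hplt

-- ===== VERDICT (by name: the statement is the Claim_ definition above) =====
theorem part6_spec : Claim_equal_part6 := by
  intro my_dict _ hpre
  unfold Spec_part6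
  exact main_eq my_dict hpre
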